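-- pv_equiv track=rewrite | github.com/hi-i-m-GTooth/De-identification-and-Time-Normalization-on-Medical-Records | gpostprocess2.py | getPreOrg2RawindexDict
-- ===== SOURCE A (Python) =====
-- from collections import defaultdict
--
-- def preprocOrgString(str):
--     return str.strip().replace('\'', '').replace(',', '').lower()
--
-- def getPreOrg2RawindexDict(file_text):
--     tmp_str, dic = "", defaultdict(None)
--     for i, c in enumerate(file_text):
--         if c == ' ' or c == '\n':
--             if tmp_str != "":
--                 # preString -> [(start_index, end_index)...]
--                 dic[preprocOrgString(tmp_str)] = [i-len(tmp_str), i-1]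
--                 tmp_str = ""
--         else:
--             tmp_str += c
--     if tmp_str != "":
--         dic[preprocOrgString(tmp_str)] = [len(file_text)-len(tmp_str), len(file_text)-1]
--     return dic
-- ===== SOURCE B (Python) =====
-- from collections import defaultdict
--
-- def preprocOrgString(str):
--     return str.strip().replace('\'', '').replace(',', '').lower()
--
-- def getPreOrg2RawindexDict(file_text):
--     # two-pointer tokenizer: skip delimiters, scan each token once as a slice
--     dic = defaultdict(None)
--     n = len(file_text)
--     i = 0
--     while i < n:
--         if file_text[i] == ' ' or file_text[i] == '\n':
--             i += 1
--             continue
--         j = i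
--         while j < n and file_text[j] != ' ' and file_text[j] != '\n':
--             j += 1
--         dic[preprocOrgString(file_text[i:j])] = [i, j - 1]
--         i = j
--     return dic
-- ===== Notes on version B (the rewrite author's own statement) =====
-- stated objective: alternative
-- what changed: Replaces the char-by-char accumulator loop (building tmp_str and flushing on delimiters plus a trailing flush) with a two-pointer tokenizer that skips delimiters and extracts each token as one slice, inserting [start, end] directly.
import Mathlib
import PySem

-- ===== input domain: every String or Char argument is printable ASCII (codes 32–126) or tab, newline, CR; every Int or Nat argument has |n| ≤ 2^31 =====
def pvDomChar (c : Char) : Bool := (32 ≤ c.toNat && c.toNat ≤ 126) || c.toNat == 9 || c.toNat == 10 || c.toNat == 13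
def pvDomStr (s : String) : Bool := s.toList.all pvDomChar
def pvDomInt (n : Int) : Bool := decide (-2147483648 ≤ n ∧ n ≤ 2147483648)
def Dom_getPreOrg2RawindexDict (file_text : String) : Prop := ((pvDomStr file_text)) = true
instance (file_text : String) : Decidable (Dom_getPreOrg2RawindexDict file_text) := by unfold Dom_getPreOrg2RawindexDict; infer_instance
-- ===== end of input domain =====

-- B replaces A's char-by-char accumulator loop with a two-pointer tokenizer that
-- skips delimiters and takes each token as one slice (alternative decomposition, same O(n) cost).


-- shared Python helper preprocOrgString (used by both A and B)
def preprocOrgString (s : String) : String :=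
  PySem.Str.lower (PySem.Str.replace (PySem.Str.replace (PySem.Str.strip s) "'" "") "," "")

-- ===== PORT A =====
-- A's loop body: state (tmp_str, dic), iterating enumerate(file_text)
def pvStepA (st : List Char × PySem.Dict String (List Int)) (ic : Int × Char) :
    List Char × PySem.Dict String (List Int) :=
  if ic.2 = ' ' ∨ ic.2 = '\n' then
    if st.1 ≠ [] then
      ([], st.2.insert (preprocOrgString (String.ofList st.1)) [ic.1 - st.1.length, ic.1 - 1])
    else st
  else (st.1 ++ [ic.2], st.2)

-- A's trailing flush (the final `if tmp_str != ""` block)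
def pvFinishA (n : Nat) (st : List Char × PySem.Dict String (List Int)) :
    PySem.Dict String (List Int) :=
  if st.1 ≠ [] then
    st.2.insert (preprocOrgString (String.ofList st.1)) [(n : Int) - st.1.length, (n : Int) - 1]
  else st.2

def getPreOrg2RawindexDict (file_text : String) : List (String × List Int) :=
  (pvFinishA file_text.toList.length
    ((PySem.List.enumerate file_text.toList 0).foldl pvStepA ([], PySem.Dict.empty))).items

-- ===== PORT B =====
-- delimiter test of B's inner scans
def pvNd (c : Char) : Bool := !(c == ' ' || c == '\n')

-- B's while loop: skip a delimiter, or take the whole token starting at index i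
def pvScanTokens (i : Nat) : List Char → List (Nat × List Char)
  | [] => []
  | c :: cs =>
    if c = ' ' ∨ c = '\n' then pvScanTokens (i + 1) cs
    else
      (i, c :: cs.takeWhile pvNd) :: pvScanTokens (i + (c :: cs.takeWhile pvNd).length) (cs.dropWhile pvNd)
  termination_by cs => cs.length
  decreasing_by
    · simp
    · simp only [List.length_cons]
      exact Nat.lt_succ_of_le (List.length_dropWhile_le _ _)

def pvInsB (d : PySem.Dict String (List Int)) (p : Nat × List Char) : PySem.Dict String (List Int) :=
  d.insert (preprocOrgString (String.ofList p.2)) [(p.1 : Int), (p.1 : Int) + p.2.length - 1]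

def getPreOrg2RawindexDict_alt (file_text : String) : List (String × List Int) :=
  ((pvScanTokens 0 file_text.toList).foldl pvInsB PySem.Dict.empty).items

-- ===== PRECONDITION & SPEC =====
def Spec_getPreOrg2RawindexDict (file_text : String) (out : List (String × List Int)) : Prop := out = getPreOrg2RawindexDict_alt file_text
instance (file_text : String) (out : List (String × List Int)) : Decidable (Spec_getPreOrg2RawindexDict file_text out) := by unfold Spec_getPreOrg2RawindexDict; infer_instance

-- ===== CLAIM (what is proved, stated in full; the proofs are below) =====
def Claim_equal_getPreOrg2RawindexDict : Prop := ∀ (file_text : String), Dom_getPreOrg2RawindexDict file_text → Spec_getPreOrg2RawindexDict file_text (getPreOrg2RawindexDict file_text)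

-- ===== LEMMAS AND PROOFS =====

-- equation lemmas for the well-founded pvScanTokens
lemma pvScan_nil (i : Nat) : pvScanTokens i [] = [] := by
  rw [pvScanTokens]

lemma pvScan_delim (i : Nat) (c : Char) (cs : List Char) (h : c = ' ' ∨ c = '\n') :
    pvScanTokens i (c :: cs) = pvScanTokens (i + 1) cs := by
  rw [pvScanTokens]; simp [h]

lemma pvScan_tok (i : Nat) (c : Char) (cs : List Char) (h : ¬(c = ' ' ∨ c = '\n')) :
    pvScanTokens i (c :: cs) =
      (i, c :: cs.takeWhile pvNd) ::
        pvScanTokens (i + (c :: cs.takeWhile pvNd).length) (cs.dropWhile pvNd) := by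
  rw [pvScanTokens]; simp [h]

-- proof-side char-by-char tokenizer with pending prefix tmp starting at index s
def pvTokP (s : Nat) (tmp : List Char) : List Char → List (Nat × List Char)
  | [] => if tmp = [] then [] else [(s, tmp)]
  | c :: cs =>
    if c = ' ' ∨ c = '\n' then
      if tmp = [] then pvTokP (s + 1) [] cs
      else (s, tmp) :: pvTokP (s + tmp.length + 1) [] cs
    else pvTokP s (tmp ++ [c]) cs

-- pvTokP agrees with B's token-at-a-time scanner
lemma pvTokP_eq_scan : ∀ (cs : List Char) (s : Nat) (tmp : List Char),
    pvTokP s tmp cs =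
      if tmp = [] then pvScanTokens s cs
      else (s, tmp ++ cs.takeWhile pvNd) ::
        pvScanTokens (s + tmp.length + (cs.takeWhile pvNd).length) (cs.dropWhile pvNd) := by
  intro cs
  induction cs with
  | nil =>
    intro s tmp
    by_cases h : tmp = [] <;> simp [pvTokP, h, pvScan_nil]
  | cons c cs ih =>
    intro s tmp
    by_cases hc : c = ' ' ∨ c = '\n'
    · have hnd : pvNd c = false := by
        rcases hc with h | h <;> simp [pvNd, h]
      by_cases h : tmp = []
      · simp [pvTokP, hc, h, ih, pvScan_delim _ _ _ hc]
      · simp [pvTokP, hc, h, List.takeWhile, List.dropWhile, hnd, ih,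
          pvScan_delim _ _ _ hc]
    · have hnd : pvNd c = true := by
        simp only [pvNd, Bool.not_eq_true', Bool.or_eq_false_iff, beq_eq_false_iff_ne]
        constructor <;> intro h <;> exact hc (by simp [h])
      by_cases h : tmp = []
      · subst h
        have h1 : pvTokP s [] (c :: cs) = pvTokP s [c] cs := by simp [pvTokP, hc]
        rw [h1, ih s [c], if_neg (by simp), pvScan_tok _ _ _ hc,
          show s + [c].length + (cs.takeWhile pvNd).length
              = s + (c :: cs.takeWhile pvNd).length from by simp; omega]
        simp
      · have h1 : pvTokP s tmp (c :: cs) = pvTokP s (tmp ++ [c]) cs := by simp [pvTokP, hc]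
        rw [h1, ih s (tmp ++ [c]), if_neg (by simp), if_neg h,
          List.takeWhile_cons_of_pos hnd, List.dropWhile_cons_of_pos hnd,
          show s + (tmp ++ [c]).length + (cs.takeWhile pvNd).length
              = s + tmp.length + (c :: cs.takeWhile pvNd).length from by simp; omega]
        simp

-- main invariant: A's fold (pending token tmp began at index k - tmp.length)
-- followed by the trailing flush equals B-style insertion of pvTokP's tokens
lemma pvLoop_eq : ∀ (cs : List Char) (k : Nat) (tmp : List Char)
    (dic : PySem.Dict String (List Int)), tmp.length ≤ k →
    pvFinishA (k + cs.length) ((PySem.List.enumerate cs (k : Int)).foldl pvStepA (tmp, dic))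
      = (pvTokP (k - tmp.length) tmp cs).foldl pvInsB dic := by
  intro cs
  induction cs with
  | nil =>
    intro k tmp dic hle
    by_cases h : tmp = []
    · simp [pvFinishA, pvTokP, h]
    · have hv : [(k : Int) - tmp.length, (k : Int) - 1]
          = [((k - tmp.length : Nat) : Int), ((k - tmp.length : Nat) : Int) + tmp.length - 1] := by
        simp only [List.cons.injEq, and_true]
        exact ⟨by omega, by omega⟩
      simp only [List.length_nil, Nat.add_zero, PySem.List.enumerate_nil, List.foldl_nil,
        pvFinishA, pvTokP, if_neg h, ne_eq, List.foldl_cons, pvInsB, hv]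
      rw [if_pos h]
  | cons c cs ih =>
    intro k tmp dic hle
    rw [PySem.List.enumerate_cons]
    have hcast : ((k : Int) + 1) = ((k + 1 : Nat) : Int) := by push_cast; ring
    have hlen : k + (c :: cs).length = k + 1 + cs.length := by simp; omega
    by_cases hc : c = ' ' ∨ c = '\n'
    · by_cases h : tmp = []
      · subst h
        have hstep : pvStepA ([], dic) ((k : Int), c) = ([], dic) := by
          simp [pvStepA, hc]
        rw [List.foldl_cons, hstep, hcast, hlen]
        have := ih (k + 1) [] dic (by simp)
        simp only [List.length_nil, Nat.sub_zero] at this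
        rw [this]
        simp [pvTokP, hc]
      · have hstep : pvStepA (tmp, dic) ((k : Int), c)
            = ([], dic.insert (preprocOrgString (String.ofList tmp))
                [(k : Int) - tmp.length, (k : Int) - 1]) := by
          simp [pvStepA, hc, h]
        rw [List.foldl_cons, hstep, hcast, hlen]
        have := ih (k + 1) []
          (dic.insert (preprocOrgString (String.ofList tmp)) [(k : Int) - tmp.length, (k : Int) - 1])
          (by simp)
        simp only [List.length_nil, Nat.sub_zero] at this
        rw [this]
        simp only [pvTokP, if_pos hc, if_neg h, List.foldl_cons]
        have hins : pvInsB dic (k - tmp.length, tmp)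
            = dic.insert (preprocOrgString (String.ofList tmp))
                [(k : Int) - tmp.length, (k : Int) - 1] := by
          simp only [pvInsB]
          congr 1
          simp only [List.cons.injEq, and_true]
          exact ⟨by omega, by omega⟩
        rw [hins, show k - tmp.length + tmp.length + 1 = k + 1 from by omega]
    · have hstep : pvStepA (tmp, dic) ((k : Int), c) = (tmp ++ [c], dic) := by
        simp [pvStepA, hc]
      rw [List.foldl_cons, hstep, hcast, hlen]
      have := ih (k + 1) (tmp ++ [c]) dic (by simp; omega)
      rw [show k + 1 - (tmp ++ [c]).length = k - tmp.length from by simp] at this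
      rw [this]
      simp [pvTokP, hc]

-- ===== VERDICT (by name: the statement is the Claim_ definition above) =====
theorem getPreOrg2RawindexDict_spec : Claim_equal_getPreOrg2RawindexDict := by
  intro file_text _
  unfold Spec_getPreOrg2RawindexDict getPreOrg2RawindexDict getPreOrg2RawindexDict_alt
  have h := pvLoop_eq file_text.toList 0 [] PySem.Dict.empty (by simp)
  rw [pvTokP_eq_scan, if_pos rfl] at h
  simp only [List.length_nil, Nat.sub_zero, Nat.zero_add, Nat.cast_zero] at h
  rw [h]
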